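-- pv_equiv track=rewrite | github.com/pvarshh/LeetCode | CodePath/Unit 2 - Dictionaries/Problem Set 1.py | organize_exhibition
-- ===== SOURCE A (Python) =====
-- def organize_exhibition(collection):
--     rows = []
--     for print in collection:
--         placed = False
--         for row in rows:
--             if print not in row:
--                 row.append(print)
--                 placed = True
--                 break
--         if not placed:
--             rows.append([print])
--     return rows
-- ===== SOURCE B (Python) =====
-- def organize_exhibition(collection):
--     counts = {}
--     rows = []
--     for x in collection:
--         k = counts.get(x, 0)
--         if k == len(rows):
--             rows.append([x])
--         else:
--             rows[k].append(x)
--         counts[x] = k + 1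
--     return rows
-- ===== Notes on version B (the rewrite author's own statement) =====
-- stated objective: faster
-- what changed: Replaces the first-fit scan over all existing rows (with an inner membership test per row) by a single pass keeping a per-value occurrence counter: the k-th copy of a value goes directly to row k.
import Mathlib
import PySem

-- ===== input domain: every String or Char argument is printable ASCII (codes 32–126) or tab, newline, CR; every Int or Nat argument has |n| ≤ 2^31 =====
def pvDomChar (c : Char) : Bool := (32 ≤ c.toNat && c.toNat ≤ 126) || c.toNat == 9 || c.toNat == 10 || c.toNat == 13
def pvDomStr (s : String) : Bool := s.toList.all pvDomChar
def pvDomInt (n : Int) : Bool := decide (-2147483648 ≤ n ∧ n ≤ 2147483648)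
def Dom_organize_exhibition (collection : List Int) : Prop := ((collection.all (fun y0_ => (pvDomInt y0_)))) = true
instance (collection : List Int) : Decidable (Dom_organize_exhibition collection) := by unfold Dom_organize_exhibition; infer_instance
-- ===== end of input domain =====

-- B replaces A's first-fit scan over rows by one pass with a per-value occurrence counter (k-th copy goes to row k); same return value, proved equal.


-- ===== PORT A =====
-- inner 'for row in rows' loop: append x to the first row not containing it, else (fall off the end) start a new row [x]
def placeA (x : Int) : List (List Int) → List (List Int)
  | [] => [[x]]
  | r :: rs => if x ∈ r then r :: placeA x rs else (r ++ [x]) :: rs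

def organize_exhibition (collection : List Int) : List (List Int) :=
  collection.foldl (fun rows x => placeA x rows) []

-- ===== PORT B =====
-- rows[k].append(x): append x to the row at (in-range, nonnegative) index k
def appendAt (x : Int) : List (List Int) → Int → List (List Int)
  | [], _ => []
  | r :: rs, k => if k == 0 then (r ++ [x]) :: rs else r :: appendAt x rs (k - 1)

def stepB (st : PySem.Dict Int Int × List (List Int)) (x : Int) :
    PySem.Dict Int Int × List (List Int) :=
  let k := st.1.getD x 0
  let rows := if k == (st.2.length : Int) then st.2 ++ [[x]] else appendAt x st.2 k
  (st.1.insert x (k + 1), rows)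

def organize_exhibition_alt (collection : List Int) : List (List Int) :=
  (collection.foldl stepB (PySem.Dict.empty, [])).2

-- ===== PRECONDITION & SPEC =====
def Spec_organize_exhibition (collection : List Int) (out : List (List Int)) : Prop := out = organize_exhibition_alt collection
instance (collection : List Int) (out : List (List Int)) : Decidable (Spec_organize_exhibition collection out) := by unfold Spec_organize_exhibition; infer_instance

-- ===== CLAIM (what is proved, stated in full; the proofs are below) =====
def Claim_equal_organize_exhibition : Prop := ∀ (collection : List Int), Dom_organize_exhibition collection → Spec_organize_exhibition collection (organize_exhibition collection)

-- ===== LEMMAS AND PROOFS =====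

-- the loop invariant: the counter gives, for every value x, a count k ≤ #rows such that
-- x is a member of exactly the first k rows
def CntInv (d : PySem.Dict Int Int) (rows : List (List Int)) : Prop :=
  ∀ x : Int, ∃ k : Nat, d.getD x 0 = (k : Int) ∧ k ≤ rows.length ∧
    ∀ i : Nat, (hi : i < rows.length) → (x ∈ rows[i] ↔ i < k)

lemma appendAt_cast_zero (x : Int) (r : List Int) (rs : List (List Int)) :
    appendAt x (r :: rs) ((0 : Nat) : Int) = (r ++ [x]) :: rs := by
  simp [appendAt]

lemma appendAt_cast_succ (x : Int) (r : List Int) (rs : List (List Int)) (k : Nat) :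
    appendAt x (r :: rs) ((k + 1 : Nat) : Int) = r :: appendAt x rs (k : Int) := by
  simp [appendAt]
  omega

lemma appendAt_length (x : Int) : ∀ (rows : List (List Int)) (k : Nat),
    (appendAt x rows (k : Int)).length = rows.length := by
  intro rows
  induction rows with
  | nil => intro k; simp [appendAt]
  | cons r rs ih =>
    intro k
    cases k with
    | zero => rw [appendAt_cast_zero]; simp
    | succ k => rw [appendAt_cast_succ]; simp [ih k]

lemma appendAt_get (x : Int) : ∀ (rows : List (List Int)) (k i : Nat) (hi : i < rows.length),
    (appendAt x rows (k : Int))[i]'(by rw [appendAt_length]; exact hi) =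
      if i = k then rows[i] ++ [x] else rows[i] := by
  intro rows
  induction rows with
  | nil => intro k i hi; simp at hi
  | cons r rs ih =>
    intro k i hi
    cases k with
    | zero =>
      simp only [appendAt_cast_zero]
      cases i with
      | zero => simp
      | succ i => simp
    | succ k =>
      simp only [appendAt_cast_succ]
      cases i with
      | zero => simp
      | succ i =>
        have hi' : i < rs.length := by simpa using hi
        simp only [List.getElem_cons_succ]
        rw [ih k i hi']
        simp

-- A's inner loop, characterised: if x lies in exactly the first k rows, first-fit targets row k
lemma place_eq (x : Int) : ∀ (rows : List (List Int)) (k : Nat), k ≤ rows.length →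
    (∀ i : Nat, (hi : i < rows.length) → (x ∈ rows[i] ↔ i < k)) →
    placeA x rows = if k = rows.length then rows ++ [[x]] else appendAt x rows (k : Int) := by
  intro rows
  induction rows with
  | nil =>
    intro k hk _
    have hk0 : k = 0 := by simpa using hk
    subst hk0
    simp [placeA]
  | cons r rs ih =>
    intro k hk hmem
    cases k with
    | zero =>
      have hx : x ∉ r := by
        have := hmem 0 (by simp)
        simpa using this
      simp only [placeA, if_neg hx]
      rw [if_neg (by simp), appendAt_cast_zero]
    | succ k =>
      have hx : x ∈ r := by
        have := hmem 0 (by simp)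
        simpa using this
      have hk' : k ≤ rs.length := by simpa using hk
      have hmem' : ∀ i : Nat, (hi : i < rs.length) → (x ∈ rs[i] ↔ i < k) := by
        intro i hi
        have := hmem (i + 1) (by simpa using hi)
        simpa using this
      simp only [placeA, if_pos hx]
      rw [ih k hk' hmem']
      by_cases h : k = rs.length
      · rw [if_pos h, if_pos (by simp [h])]
        simp
      · rw [if_neg h, if_neg (by simp [h]), appendAt_cast_succ]

lemma inv_empty : CntInv (PySem.Dict.empty : PySem.Dict Int Int) [] := by
  intro x
  exact ⟨0, by simp [PySem.Dict.getD_empty], by simp, by intro i hi; simp at hi⟩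

lemma step_eq_and_inv (d : PySem.Dict Int Int) (rows : List (List Int)) (x : Int)
    (h : CntInv d rows) :
    placeA x rows = (stepB (d, rows) x).2 ∧ CntInv (stepB (d, rows) x).1 (stepB (d, rows) x).2 := by
  obtain ⟨k, hk, hle, hmem⟩ := h x
  have hstep : stepB (d, rows) x =
      (d.insert x ((k : Int) + 1),
        if k = rows.length then rows ++ [[x]] else appendAt x rows (k : Int)) := by
    show (d.insert x (d.getD x 0 + 1),
        if d.getD x 0 == ((rows.length : Nat) : Int) then rows ++ [[x]]
        else appendAt x rows (d.getD x 0)) = _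
    rw [hk]
    by_cases hkl : k = rows.length
    · simp [hkl]
    · rw [if_neg (by simp [hkl]), if_neg hkl]
  rw [hstep]
  refine ⟨?_, ?_⟩
  · exact place_eq x rows k hle hmem
  · intro y
    by_cases hyx : y = x
    · subst hyx
      refine ⟨k + 1, ?_, ?_, ?_⟩
      · rw [PySem.Dict.getD_insert_self]; push_cast; ring
      · by_cases hkl : k = rows.length
        · rw [if_pos hkl]; simp [hkl]
        · rw [if_neg hkl, appendAt_length]; omega
      · intro i hi
        by_cases hkl : k = rows.length
        · simp only [if_pos hkl] at hi ⊢
          simp only [List.length_append, List.length_singleton] at hi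
          by_cases hil : i < rows.length
          · rw [List.getElem_append_left hil, hmem i hil]
            omega
          · have hieq : i = rows.length := by omega
            subst hieq
            rw [List.getElem_append_right (by omega)]
            simp [hkl]
        · simp only [if_neg hkl] at hi ⊢
          simp only [appendAt_length] at hi
          have hir : i < rows.length := hi
          rw [appendAt_get y rows k i hir]
          by_cases hik : i = k
          · subst hik; simp
          · rw [if_neg hik, hmem i hir]
            omega
    · obtain ⟨ky, hky, hkyle, hkymem⟩ := h y
      refine ⟨ky, ?_, ?_, ?_⟩
      · rw [PySem.Dict.getD_insert_of_ne d _ _ hyx, hky]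
      · by_cases hkl : k = rows.length
        · rw [if_pos hkl]; simp; omega
        · rw [if_neg hkl, appendAt_length]; omega
      · intro i hi
        by_cases hkl : k = rows.length
        · simp only [if_pos hkl] at hi ⊢
          simp only [List.length_append, List.length_singleton] at hi
          by_cases hil : i < rows.length
          · rw [List.getElem_append_left hil]
            exact hkymem i hil
          · have hieq : i = rows.length := by omega
            subst hieq
            rw [List.getElem_append_right (by omega)]
            simp only [Nat.sub_self, List.getElem_singleton, List.mem_singleton]
            constructor
            · intro hyx'; exact absurd hyx' hyx
            · intro hlt; omega
        · simp only [if_neg hkl] at hi ⊢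
          simp only [appendAt_length] at hi
          have hir : i < rows.length := hi
          rw [appendAt_get x rows k i hir]
          by_cases hik : i = k
          · subst hik
            rw [if_pos rfl]
            simp only [List.mem_append, List.mem_singleton]
            rw [hkymem i hir]
            constructor
            · rintro (hm | hm)
              · exact hm
              · exact absurd hm hyx
            · exact Or.inl
          · rw [if_neg hik]
            exact hkymem i hir

lemma fold_eq : ∀ (l : List Int) (d : PySem.Dict Int Int) (rows : List (List Int)),
    CntInv d rows →
    l.foldl (fun rows x => placeA x rows) rows = (l.foldl stepB (d, rows)).2 := by
  intro l
  induction l with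
  | nil => intro d rows _; rfl
  | cons x xs ih =>
    intro d rows h
    obtain ⟨heq, hinv⟩ := step_eq_and_inv d rows x h
    simp only [List.foldl_cons]
    rw [heq]
    exact ih (stepB (d, rows) x).1 (stepB (d, rows) x).2 hinv

-- ===== VERDICT (by name: the statement is the Claim_ definition above) =====
theorem organize_exhibition_spec : Claim_equal_organize_exhibition := by
  intro collection _
  show organize_exhibition collection = organize_exhibition_alt collection
  exact fold_eq collection PySem.Dict.empty [] inv_empty
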